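-- pv_equiv track=rewrite | github.com/JonathanSaless/CODIFICACAO_EM_BANDA_BASE | pseudoternary.py | PSEUDOTERNARY
-- ===== SOURCE A (Python) =====
-- def PSEUDOTERNARY(dados):
--     pseudoternary = []
--     ultimo_volt = -1
--     for i in range (len(dados)):
--         if dados[i] == 1:
--             pseudoternary.append(0)
--         else:
--             ultimo_volt *= -1
--             pseudoternary.append(ultimo_volt)
--     return pseudoternary
-- ===== SOURCE B (Python) =====
-- def PSEUDOTERNARY(dados):
--     # pass 1: prefix count of zero-bits (anything != 1) at each position
--     zeros = []
--     c = 0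
--     for d in dados:
--         if d != 1:
--             c += 1
--         zeros.append(c)
--     # pass 2: map parity of the prefix count to the pulse
--     return [0 if d == 1 else (1 if z % 2 == 1 else -1) for d, z in zip(dados, zeros)]
-- ===== Notes on version B (the rewrite author's own statement) =====
-- stated objective: alternative
-- what changed: Replaces the carried toggling-voltage state by a precomputed prefix table of zero-bit counts plus a stateless map over zip(dados, prefix) using the count's parity.
import Mathlib
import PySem

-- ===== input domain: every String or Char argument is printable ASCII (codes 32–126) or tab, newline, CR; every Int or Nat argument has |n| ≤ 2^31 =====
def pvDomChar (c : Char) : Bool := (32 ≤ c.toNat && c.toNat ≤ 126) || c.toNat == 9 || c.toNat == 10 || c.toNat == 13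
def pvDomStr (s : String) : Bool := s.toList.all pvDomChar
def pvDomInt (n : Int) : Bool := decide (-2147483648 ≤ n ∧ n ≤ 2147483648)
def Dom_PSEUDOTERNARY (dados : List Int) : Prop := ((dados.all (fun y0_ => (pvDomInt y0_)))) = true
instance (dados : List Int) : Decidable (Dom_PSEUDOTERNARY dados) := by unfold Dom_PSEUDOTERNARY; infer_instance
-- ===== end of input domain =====

-- B replaces A's carried toggling voltage by a prefix table of zero-bit counts and a parity map (alternative decomposition, same cost).

-- ===== PORT A =====
-- A's loop state: (pseudoternary, ultimo_volt); the range(len) loop reads dados[i] in order.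
def pvAstep (st : List Int × Int) (d : Int) : List Int × Int :=
  if d = 1 then (st.1 ++ [0], st.2)
  else (st.1 ++ [-st.2], -st.2)

def PSEUDOTERNARY (dados : List Int) : List Int :=
  (dados.foldl pvAstep ([], -1)).1

-- ===== PORT B =====
-- pass 1 of Source B: running zero-bit count appended to a prefix table
def pvBstep (st : List Int × Int) (d : Int) : List Int × Int :=
  let c := if d ≠ 1 then st.2 + 1 else st.2
  (st.1 ++ [c], c)

def PSEUDOTERNARY_alt (dados : List Int) : List Int :=
  let zeros := (dados.foldl pvBstep ([], 0)).1
  (dados.zip zeros).map (fun p => if p.1 = 1 then 0 else if p.2 % 2 = 1 then 1 else -1)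

-- ===== PRECONDITION & SPEC =====
def Spec_PSEUDOTERNARY (dados : List Int) (out : List Int) : Prop := out = PSEUDOTERNARY_alt dados
instance (dados : List Int) (out : List Int) : Decidable (Spec_PSEUDOTERNARY dados out) := by unfold Spec_PSEUDOTERNARY; infer_instance

-- ===== CLAIM (what is proved, stated in full; the proofs are below) =====
def Claim_equal_PSEUDOTERNARY : Prop := ∀ (dados : List Int), Dom_PSEUDOTERNARY dados → Spec_PSEUDOTERNARY dados (PSEUDOTERNARY dados)

-- ===== LEMMAS AND PROOFS =====

theorem pvAfold_acc (xs : List Int) (acc : List Int) (v : Int) :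
    (xs.foldl pvAstep (acc, v)).1 = acc ++ (xs.foldl pvAstep ([], v)).1 := by
  induction xs generalizing acc v with
  | nil => simp
  | cons d rest ih =>
    simp only [List.foldl_cons, pvAstep]
    by_cases h : d = 1
    · rw [if_pos h, if_pos h, ih (acc ++ [0]) v, ih ([] ++ [0]) v]; simp
    · rw [if_neg h, if_neg h, ih (acc ++ [-v]) (-v), ih ([] ++ [-v]) (-v)]; simp

theorem pvBfold_acc (xs : List Int) (acc : List Int) (c : Int) :
    (xs.foldl pvBstep (acc, c)).1 = acc ++ (xs.foldl pvBstep ([], c)).1 := by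
  induction xs generalizing acc c with
  | nil => simp
  | cons d rest ih =>
    simp only [List.foldl_cons, pvBstep]
    by_cases h : d = 1
    · simp only [h, ne_eq, not_true_eq_false, if_false]
      rw [ih (acc ++ [c]) c, ih ([] ++ [c]) c]; simp
    · simp only [ne_eq, h, not_false_eq_true, if_true]
      rw [ih (acc ++ [c+1]) (c+1), ih ([] ++ [c+1]) (c+1)]; simp

theorem pv_main (xs : List Int) (c : Int) (hc : 0 ≤ c) :
    (xs.foldl pvAstep ([], if c % 2 = 1 then 1 else -1)).1 =
      (xs.zip ((xs.foldl pvBstep ([], c)).1)).map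
        (fun p => if p.1 = 1 then 0 else if p.2 % 2 = 1 then 1 else -1) := by
  induction xs generalizing c with
  | nil => simp
  | cons d rest ih =>
    simp only [List.foldl_cons, pvAstep, pvBstep]
    by_cases h : d = 1
    · simp only [h]
      rw [pvAfold_acc, pvBfold_acc]
      simp [ih c hc]
    · simp only [h, ite_true, ne_eq, not_false_iff]
      rw [pvAfold_acc, pvBfold_acc]
      have hpar : -(if c % 2 = 1 then (1:Int) else -1) = (if (c+1) % 2 = 1 then (1:Int) else -1) := by
        have h2 : c % 2 = 0 ∨ c % 2 = 1 := Int.emod_two_eq_zero_or_one c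
        rcases h2 with h2 | h2 <;> simp [h2] <;> omega
      simp only [hpar]
      simp [ih (c+1) (by omega), h]

-- ===== VERDICT (by name: the statement is the Claim_ definition above) =====
theorem PSEUDOTERNARY_spec : Claim_equal_PSEUDOTERNARY := by
  intro dados _
  show PSEUDOTERNARY dados = PSEUDOTERNARY_alt dados
  have := pv_main dados 0 le_rfl
  simpa [PSEUDOTERNARY, PSEUDOTERNARY_alt] using this
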